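-- pv_equiv track=rewrite | github.com/WrenchAI/WrenchCL | WrenchCL/scripts/combine_files.py | remove_copyright
-- ===== SOURCE A (Python) =====
-- def remove_copyright(content: str) -> str:
--     """
--     Remove copyright statements from the content.
--
--     :param content: The content from which to remove copyright statements.
--     :return: Content without copyright statements.
--     """
--     lines = content.split('\n')
--     non_copyright_lines = []
--     skip_lines = True
--     inside_copyright = False
--
--     for line in lines:
--         # Check for the start of the copyright block
--         if line.startswith('#  Copyright'):
--             inside_copyright = True
--             continue
--         # Check for the end of the copyright block
--         if inside_copyright and (line.strip() == '' or line.startswith('#')):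
--             continue
--         else:
--             inside_copyright = False
--
--         # Add non-copyright lines
--         if not inside_copyright:
--             non_copyright_lines.append(line)
--
--     return '\n'.join(non_copyright_lines)
-- ===== SOURCE B (Python) =====
-- def remove_copyright(content: str) -> str:
--     """Index-driven scan: consume each copyright block as a unit with an inner skip loop."""
--     lines = content.split('\n')
--     out = []
--     i = 0
--     n = len(lines)
--     while i < n:
--         if lines[i].startswith('#  Copyright'):
--             i += 1
--             while i < n and (lines[i].strip() == '' or lines[i].startswith('#')):
--                 i += 1
--         else:
--             out.append(lines[i])
--             i += 1
--     return '\n'.join(out)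
-- ===== Notes on version B (the rewrite author's own statement) =====
-- stated objective: alternative
-- what changed: Replaces A's per-line boolean-flag state machine with an index-driven scan that consumes each copyright block as a unit via an inner skip loop, eliminating the inside_copyright flag.
import Mathlib
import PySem

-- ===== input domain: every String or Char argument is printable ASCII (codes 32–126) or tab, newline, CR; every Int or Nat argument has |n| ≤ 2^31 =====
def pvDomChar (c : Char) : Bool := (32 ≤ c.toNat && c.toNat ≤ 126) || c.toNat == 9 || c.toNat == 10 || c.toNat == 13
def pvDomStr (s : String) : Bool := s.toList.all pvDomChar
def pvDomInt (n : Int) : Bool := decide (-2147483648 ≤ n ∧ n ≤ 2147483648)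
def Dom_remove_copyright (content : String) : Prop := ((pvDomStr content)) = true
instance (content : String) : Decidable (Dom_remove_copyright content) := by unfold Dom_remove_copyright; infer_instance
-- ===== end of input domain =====

-- B replaces A's boolean-flag state machine with an index-driven scan that consumes
-- each copyright block as a unit via an inner skip loop (objective: alternative).


-- ===== PORT A =====
-- A's loop over the lines, carrying the inside_copyright flag.
def pvAloop : List (List Char) → Bool → List (List Char)
  | [], _ => []
  | l :: rest, inside =>
    if PySem.Chars.startswith l "#  Copyright".toList then
      pvAloop rest true
    else if inside && (PySem.Chars.strip l == ([] : List Char) || PySem.Chars.startswith l ['#']) then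
      pvAloop rest true
    else
      l :: pvAloop rest false

def remove_copyright (content : String) : String :=
  String.ofList (PySem.Chars.join ['\n'] (pvAloop (PySem.Chars.splitOn content.toList ['\n']) false))

-- ===== PORT B =====
-- B's inner while-loop: skip blank/comment lines following a copyright header.
def pvSkip : List (List Char) → List (List Char)
  | [] => []
  | l :: rest =>
    if PySem.Chars.strip l == ([] : List Char) || PySem.Chars.startswith l ['#'] then pvSkip rest
    else l :: rest

theorem pvSkip_length_le (ls : List (List Char)) : (pvSkip ls).length ≤ ls.length := by
  induction ls with
  | nil => simp [pvSkip]
  | cons l rest ih => simp only [pvSkip]; split <;> simp_all <;> omega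

-- B's outer loop over the lines.
def pvBloop : List (List Char) → List (List Char)
  | [] => []
  | l :: rest =>
    if PySem.Chars.startswith l "#  Copyright".toList then
      pvBloop (pvSkip rest)
    else
      l :: pvBloop rest
termination_by ls => ls.length
decreasing_by
  · exact Nat.lt_succ_of_le (pvSkip_length_le rest)
  · simp

def remove_copyright_alt (content : String) : String :=
  String.ofList (PySem.Chars.join ['\n'] (pvBloop (PySem.Chars.splitOn content.toList ['\n'])))

-- ===== PRECONDITION & SPEC =====
def Spec_remove_copyright (content : String) (out : String) : Prop := out = remove_copyright_alt content
instance (content : String) (out : String) : Decidable (Spec_remove_copyright content out) := by unfold Spec_remove_copyright; infer_instance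

-- ===== CLAIM (what is proved, stated in full; the proofs are below) =====
def Claim_equal_remove_copyright : Prop := ∀ (content : String), Dom_remove_copyright content → Spec_remove_copyright content (remove_copyright content)

-- ===== LEMMAS AND PROOFS =====
theorem pv_starts_hash {l : List Char}
    (h : PySem.Chars.startswith l "#  Copyright".toList = true) :
    PySem.Chars.startswith l ['#'] = true := by
  rw [PySem.Chars.startswith_iff] at h ⊢
  exact List.IsPrefix.trans (by decide) h

theorem pvAloop_eq_pvBloop (ls : List (List Char)) :
    pvAloop ls false = pvBloop ls ∧ pvAloop ls true = pvBloop (pvSkip ls) := by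
  induction ls with
  | nil => exact ⟨by simp [pvAloop, pvBloop], by simp [pvAloop, pvBloop, pvSkip]⟩
  | cons l rest ih =>
    constructor
    · simp only [pvAloop, pvBloop]
      split
      · exact ih.2
      · simp [ih.1]
    · simp only [pvAloop, pvSkip]
      by_cases hc : PySem.Chars.startswith l "#  Copyright".toList = true
      · rw [if_pos hc, if_pos (by simp [pv_starts_hash hc]),
          show pvBloop (pvSkip rest) = pvAloop rest true from ih.2.symm]
      · rw [if_neg hc]
        by_cases hb : (PySem.Chars.strip l == ([] : List Char) || PySem.Chars.startswith l ['#']) = true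
        · simp only [hb, Bool.true_and, if_true]
          exact ih.2
        · simp only [hb, Bool.and_false, if_false, Bool.false_eq_true]
          rw [pvBloop, if_neg hc, ih.1]

theorem remove_copyright_spec : Claim_equal_remove_copyright := by
  intro content _
  unfold Spec_remove_copyright remove_copyright remove_copyright_alt
  rw [(pvAloop_eq_pvBloop _).1]
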